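-- pv_equiv track=rewrite | github.com/MorganSeguela/EuropeanParliamentVote | data_upload/write_vote_data.py | extract_id_voter
-- ===== SOURCE A (Python) =====
-- def extract_id_voter_pg(verification, pg_vote):
--     """Retrieve parliamentarian id in the political group vote.
--     In fact, for each vote value, parliamentarian are grouped in political group
--
--     Args:
--         verification (parl_id_seat, exist_parl_id): vector of data to verify if parliamentarian already taken into account
--         pg_vote (dict): dictionnary of each vote value with pg name as key
--
--     Returns:
--         vect(success_result, fail_result): parliamentarian id and name for vote
--     """
--     seat_data, db_data = verification
--
--     result = []
--     fail_result = {"notInDb": [],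
--                    "noSeat": []}
--
--     for  cur_pg in pg_vote:
--         parl_id = cur_pg["PersId"]
--         parl_name = cur_pg["Name"]
--
--         # Verify result
--         hasSeat = parl_id in seat_data.keys()
--         isInDB = int(parl_id) in db_data
--
--         if isInDB and hasSeat:
--             result.append(parl_id)
--         else:
--             if not isInDB:
--                 fail_result["notInDb"].append([parl_id, parl_name])
--             if not hasSeat:
--                 fail_result["noSeat"].append([parl_id, parl_name])
--     return (result, fail_result)
--
-- def extract_id_voter(verifiation, vote):
--     """Extract parliamentarian id for each vote value
--
--     Args:
--         verifiation (parl_id_seat, exist_parl_id): vector of data to verify if parliamentarian already taken into account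
--         vote (dict): dictionary of vote value
--
--     Returns:
--         vect(dict, dict): successful and fail result of parliamentarian id
--     """
--     tmp_success = []
--     tmp_fail = {"notInDb":[],
--                 "noSeat" :[]}
--     for pg_name in vote.keys():
--         for_pg_data = vote[pg_name]
--         success_result, fail_result = extract_id_voter_pg(verifiation, for_pg_data)
--         tmp_success.extend(success_result)
--         tmp_fail["notInDb"].extend(fail_result["notInDb"])
--         tmp_fail["noSeat"].extend(fail_result["noSeat"])
--
--     return (tmp_success, tmp_fail)
-- ===== SOURCE B (Python) =====
-- def extract_id_voter(verifiation, vote):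
--     """Flatten all parliamentarians once, then build each of the three
--     output lists with an independent pass over the flat list."""
--     seat_data, db_data = verifiation
--     items = [p for pg in vote.values() for p in pg]
--     success = [p["PersId"] for p in items
--                if int(p["PersId"]) in db_data and p["PersId"] in seat_data.keys()]
--     notInDb = [[p["PersId"], p["Name"]] for p in items
--                if int(p["PersId"]) not in db_data]
--     noSeat = [[p["PersId"], p["Name"]] for p in items
--               if p["PersId"] not in seat_data.keys()]
--     return (success, {"notInDb": notInDb, "noSeat": noSeat})
-- ===== Notes on version B (the rewrite author's own statement) =====
-- stated objective: simpler
-- what changed: Replaces the helper-per-group routing loop (one pass that sends each parliamentarian into success/notInDb/noSeat via nested conditionals) by flattening all groups once and building each of the three output lists with its own independent filtering pass over the flat list.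
-- outside the precondition, e.g. on extract_id_voter(({}, set()), {'g': [{'Name': 'x'}]}): A raises KeyError, B raises KeyError; on extract_id_voter(({}, set()), {'g': [{'PersId': 'zz', 'Name': 'x'}]}): A raises ValueError, B raises ValueError
import Mathlib
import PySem

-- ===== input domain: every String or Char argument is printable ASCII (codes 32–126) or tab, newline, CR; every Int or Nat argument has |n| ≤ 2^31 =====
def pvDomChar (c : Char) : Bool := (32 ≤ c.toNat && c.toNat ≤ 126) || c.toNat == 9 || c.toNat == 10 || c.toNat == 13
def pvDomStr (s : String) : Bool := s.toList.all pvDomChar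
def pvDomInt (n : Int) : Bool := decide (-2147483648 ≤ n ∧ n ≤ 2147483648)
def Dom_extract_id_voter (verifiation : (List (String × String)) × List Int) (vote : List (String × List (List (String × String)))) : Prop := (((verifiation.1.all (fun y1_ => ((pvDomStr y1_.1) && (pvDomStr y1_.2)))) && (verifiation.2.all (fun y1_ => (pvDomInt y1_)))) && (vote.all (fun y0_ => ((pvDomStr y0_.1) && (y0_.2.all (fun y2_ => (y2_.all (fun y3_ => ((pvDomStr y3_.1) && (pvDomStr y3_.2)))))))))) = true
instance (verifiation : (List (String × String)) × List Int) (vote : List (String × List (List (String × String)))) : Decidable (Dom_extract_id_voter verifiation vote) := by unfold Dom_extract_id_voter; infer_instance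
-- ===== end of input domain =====

-- B flattens all groups once and builds success/notInDb/noSeat with three independent
-- filtering passes instead of A's per-group helper loop that routes each item via nested
-- conditionals (different decomposition; same cost).


-- ===== PORT A =====
-- d[k] on an association list (first match); none = KeyError
def pvLookup (d : List (String × String)) (k : String) : Option String :=
  (d.find? (fun p => p.1 == k)).map (·.2)

-- int(parl_id) in db_data; the `none` (ValueError) case is excluded by Pre_
def pvIsInDB (db : List Int) (parl_id : String) : Bool :=
  match PySem.Int.ofStr? parl_id with
  | some n => db.contains n
  | none => false

def extract_id_voter_pg (verification : (List (String × String)) × List Int)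
    (pg_vote : List (List (String × String))) :
    List String × List (List String) × List (List String) :=
  pg_vote.foldl (fun st cur_pg =>
    let parl_id := (pvLookup cur_pg "PersId").getD ""      -- KeyError excluded by Pre_
    let parl_name := (pvLookup cur_pg "Name").getD ""      -- KeyError excluded by Pre_
    let hasSeat := (pvLookup verification.1 parl_id).isSome
    let isInDB := pvIsInDB verification.2 parl_id
    if isInDB && hasSeat then (st.1 ++ [parl_id], st.2)
    else (st.1,
          (if !isInDB then st.2.1 ++ [[parl_id, parl_name]] else st.2.1),
          (if !hasSeat then st.2.2 ++ [[parl_id, parl_name]] else st.2.2)))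
    ([], [], [])

def extract_id_voter (verifiation : (List (String × String)) × List Int)
    (vote : List (String × List (List (String × String)))) :
    List String × (List (String × List (List String))) :=
  let st := (vote.map Prod.fst).foldl (fun st pg_name =>
    let for_pg_data := ((vote.find? (fun p => p.1 == pg_name)).map (·.2)).getD []
    let r := extract_id_voter_pg verifiation for_pg_data
    (st.1 ++ r.1, st.2.1 ++ r.2.1, st.2.2 ++ r.2.2))
    (([], [], []) : List String × List (List String) × List (List String))
  (st.1, [("notInDb", st.2.1), ("noSeat", st.2.2)])

-- ===== PORT B =====
def extract_id_voter_alt (verifiation : (List (String × String)) × List Int)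
    (vote : List (String × List (List (String × String)))) :
    List String × (List (String × List (List String))) :=
  let items := (vote.map Prod.snd).flatten
  let pid := fun (p : List (String × String)) => (pvLookup p "PersId").getD ""
  let nm := fun (p : List (String × String)) => (pvLookup p "Name").getD ""
  let success := (items.filter (fun p =>
      pvIsInDB verifiation.2 (pid p) && (pvLookup verifiation.1 (pid p)).isSome)).map pid
  let notInDb := (items.filter (fun p => !(pvIsInDB verifiation.2 (pid p)))).map
      (fun p => [pid p, nm p])
  let noSeat := (items.filter (fun p => !((pvLookup verifiation.1 (pid p)).isSome))).map
      (fun p => [pid p, nm p])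
  (success, [("notInDb", notInDb), ("noSeat", noSeat)])

-- ===== PRECONDITION & SPEC =====
-- Pre_ excludes (a) association lists for `vote` with duplicate group-name keys, which no
-- Python dict can produce, and (b) inputs where Python raises: a parliamentarian record
-- missing the "PersId" or "Name" key (KeyError) or whose "PersId" does not parse as an
-- int (ValueError).
def Pre_extract_id_voter (verifiation : (List (String × String)) × List Int)
    (vote : List (String × List (List (String × String)))) : Prop :=
  (vote.map Prod.fst).Nodup ∧
  ∀ g ∈ vote, ∀ p ∈ g.2,
    (pvLookup p "PersId").isSome ∧ (pvLookup p "Name").isSome ∧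
    (PySem.Int.ofStr? ((pvLookup p "PersId").getD "")).isSome
instance (verifiation : (List (String × String)) × List Int) (vote : List (String × List (List (String × String)))) : Decidable (Pre_extract_id_voter verifiation vote) := by unfold Pre_extract_id_voter; infer_instance

def pvWitness_extract_id_voter : ((List (String × String)) × List Int) × (List (String × List (List (String × String)))) :=
  (([("1", "s")], [1, 3]),
   [("G1", [[("PersId", "1"), ("Name", "A")], [("PersId", "2"), ("Name", "B")]]),
    ("G2", [[("PersId", "3"), ("Name", "C")]])])

def Spec_extract_id_voter (verifiation : (List (String × String)) × List Int) (vote : List (String × List (List (String × String)))) (out : List String × (List (String × List (List String)))) : Prop := out = extract_id_voter_alt verifiation vote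
instance (verifiation : (List (String × String)) × List Int) (vote : List (String × List (List (String × String)))) (out : List String × (List (String × List (List String)))) : Decidable (Spec_extract_id_voter verifiation vote out) := by unfold Spec_extract_id_voter; infer_instance

-- ===== CLAIM (what is proved, stated in full; the proofs are below) =====
def Claim_equal_extract_id_voter : Prop := ∀ (verifiation : (List (String × String)) × List Int) (vote : List (String × List (List (String × String)))), Dom_extract_id_voter verifiation vote → Pre_extract_id_voter verifiation vote → Spec_extract_id_voter verifiation vote (extract_id_voter verifiation vote)

-- ===== LEMMAS AND PROOFS =====

-- the three per-group result lists B computes, named for the proofs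
def pvSuc (v : (List (String × String)) × List Int) (pg : List (List (String × String))) : List String :=
  (pg.filter (fun p => pvIsInDB v.2 ((pvLookup p "PersId").getD "") &&
      (pvLookup v.1 ((pvLookup p "PersId").getD "")).isSome)).map
    (fun p => (pvLookup p "PersId").getD "")
def pvNdb (v : (List (String × String)) × List Int) (pg : List (List (String × String))) : List (List String) :=
  (pg.filter (fun p => !(pvIsInDB v.2 ((pvLookup p "PersId").getD "")))).map
    (fun p => [(pvLookup p "PersId").getD "", (pvLookup p "Name").getD ""])
def pvNst (v : (List (String × String)) × List Int) (pg : List (List (String × String))) : List (List String) :=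
  (pg.filter (fun p => !((pvLookup v.1 ((pvLookup p "PersId").getD "")).isSome))).map
    (fun p => [(pvLookup p "PersId").getD "", (pvLookup p "Name").getD ""])

lemma pg_fold (v : (List (String × String)) × List Int)
    (pg : List (List (String × String)))
    (st : List String × List (List String) × List (List String)) :
    pg.foldl (fun st cur_pg =>
      let parl_id := (pvLookup cur_pg "PersId").getD ""
      let parl_name := (pvLookup cur_pg "Name").getD ""
      let hasSeat := (pvLookup v.1 parl_id).isSome
      let isInDB := pvIsInDB v.2 parl_id
      if isInDB && hasSeat then (st.1 ++ [parl_id], st.2)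
      else (st.1,
            (if !isInDB then st.2.1 ++ [[parl_id, parl_name]] else st.2.1),
            (if !hasSeat then st.2.2 ++ [[parl_id, parl_name]] else st.2.2)))
      st
    = (st.1 ++ pvSuc v pg, st.2.1 ++ pvNdb v pg, st.2.2 ++ pvNst v pg) := by
  induction pg generalizing st with
  | nil => simp [pvSuc, pvNdb, pvNst]
  | cons p rest ih =>
    simp only [List.foldl_cons, ih, pvSuc, pvNdb, pvNst, List.filter_cons]
    cases hdb : pvIsInDB v.2 ((pvLookup p "PersId").getD "") <;>
      cases hst : (pvLookup v.1 ((pvLookup p "PersId").getD "")).isSome <;>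
        simp

lemma pg_spec (v : (List (String × String)) × List Int) (pg : List (List (String × String))) :
    extract_id_voter_pg v pg = (pvSuc v pg, pvNdb v pg, pvNst v pg) := by
  simpa only [List.nil_append] using pg_fold v pg ([], [], [])

lemma find_self {vote : List (String × List (List (String × String)))}
    (hnd : (vote.map Prod.fst).Nodup) {p} (hp : p ∈ vote) :
    vote.find? (fun q => q.1 == p.1) = some p := by
  induction vote with
  | nil => simp at hp
  | cons q rest ih =>
    simp only [List.map_cons, List.nodup_cons] at hnd
    simp only [List.mem_cons] at hp
    rcases hp with hp | hp
    · subst hp; simp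
    · have hne : ¬ (q.1 == p.1) = true := by
        intro h
        exact hnd.1 (by simpa [eq_of_beq h] using List.mem_map_of_mem (f := Prod.fst) hp)
      simp [hne, ih hnd.2 hp]

lemma outer_fold (v : (List (String × String)) × List Int)
    (vote : List (String × List (List (String × String))))
    (st : List String × List (List String) × List (List String)) :
    vote.foldl (fun st p =>
        (st.1 ++ pvSuc v p.2, st.2.1 ++ pvNdb v p.2, st.2.2 ++ pvNst v p.2)) st
    = (st.1 ++ pvSuc v (vote.map Prod.snd).flatten,
       st.2.1 ++ pvNdb v (vote.map Prod.snd).flatten,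
       st.2.2 ++ pvNst v (vote.map Prod.snd).flatten) := by
  induction vote generalizing st with
  | nil => simp [pvSuc, pvNdb, pvNst]
  | cons p rest ih =>
    rw [List.foldl_cons, ih]
    simp [pvSuc, pvNdb, pvNst, List.filter_append]

-- ===== VERDICT (by name: the statement is the Claim_ definition above) =====
theorem extract_id_voter_spec : Claim_equal_extract_id_voter := by
  intro v vote _ hpre
  show _ = _
  unfold extract_id_voter extract_id_voter_alt
  simp only []
  have hcongr : (vote.map Prod.fst).foldl (fun st pg_name =>
      let for_pg_data := ((vote.find? (fun p => p.1 == pg_name)).map (·.2)).getD []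
      let r := extract_id_voter_pg v for_pg_data
      (st.1 ++ r.1, st.2.1 ++ r.2.1, st.2.2 ++ r.2.2)) ([], [], [])
      = vote.foldl (fun st p =>
        (st.1 ++ pvSuc v p.2, st.2.1 ++ pvNdb v p.2, st.2.2 ++ pvNst v p.2)) ([], [], []) := by
    rw [List.foldl_map]
    apply PySem.List.foldl_congr_mem
    intro st p hp
    rw [find_self hpre.1 hp]
    simp [pg_spec]
  rw [hcongr, outer_fold]
  simp [pvSuc, pvNdb, pvNst]
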